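-- pv_equiv track=rewrite | github.com/gru13/gru-module | scratch/ZJy.py | marsExploration
-- ===== SOURCE A (Python) =====
-- def marsExploration(s):
--     n=3
--     dive=[s[i:i+n]for i in range(0, len(s), n)]
--     n=dive.count('SOS')
--     for a in range(n):
--         dive.remove('SOS')
--     l=str()
--     for a in dive:
--         l+=a
--     dive=[a for a in l]
--     for a in range(dive.count('S')):
--         dive.remove('S')
--     for a in range(dive.count('O')):
--         dive.remove('O')
--     return len(dive)
-- ===== SOURCE B (Python) =====
-- def marsExploration(s):
--     return len(s) - s.count('S') - s.count('O')
-- ===== Notes on version B (the rewrite author's own statement) =====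
-- stated objective: faster
-- what changed: A builds the 3-char chunk list, repeatedly calls list.remove to delete the 'SOS' chunks and then every 'S' and 'O' character of the concatenation; B uses the closed form len(s) - s.count('S') - s.count('O'), valid because the removed 'SOS' chunks contain only 'S' and 'O' characters.
import Mathlib
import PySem

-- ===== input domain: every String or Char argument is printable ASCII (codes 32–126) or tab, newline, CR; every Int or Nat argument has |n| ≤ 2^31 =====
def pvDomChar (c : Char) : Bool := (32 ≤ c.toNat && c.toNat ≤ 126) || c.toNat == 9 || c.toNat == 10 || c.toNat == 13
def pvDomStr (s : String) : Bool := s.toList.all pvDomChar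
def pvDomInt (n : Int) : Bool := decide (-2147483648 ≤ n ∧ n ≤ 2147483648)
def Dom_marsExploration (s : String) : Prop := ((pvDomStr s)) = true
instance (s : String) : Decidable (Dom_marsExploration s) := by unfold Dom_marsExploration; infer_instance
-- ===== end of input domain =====

-- B replaces A's build-chunks/remove-'SOS'/concatenate/remove-'S'-and-'O' pipeline by the
-- closed form len(s) - s.count('S') - s.count('O'): the removed 'SOS' chunks contain only
-- 'S' and 'O', so every surviving character is exactly a non-'S'/'O' character of s (objective: faster).

-- ===== PORT A =====
def marsExploration (s : String) : Int :=
  let cs := s.toList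
  let dive := (PySem.List.pyRange 0 (cs.length : Int) 3).map
      (fun i => PySem.List.slice cs (some i) (some (i + 3)))
  let n := PySem.List.count dive "SOS".toList
  let dive := (PySem.List.pyRange 0 (n : Int) 1).foldl
      (fun d _ => (PySem.List.remove? d "SOS".toList).getD d) dive
  let l := dive.foldl (fun acc a => acc ++ a) ([] : List Char)
  let dive2 := l.map (fun a => a)
  let dive3 := (PySem.List.pyRange 0 ((PySem.List.count dive2 'S' : Nat) : Int) 1).foldl
      (fun d _ => (PySem.List.remove? d 'S').getD d) dive2
  let dive4 := (PySem.List.pyRange 0 ((PySem.List.count dive3 'O' : Nat) : Int) 1).foldl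
      (fun d _ => (PySem.List.remove? d 'O').getD d) dive3
  ((dive4.length : Nat) : Int)

-- ===== PORT B =====
def marsExploration_alt (s : String) : Int :=
  PySem.Str.len s - ((PySem.Str.count s "S" : Nat) : Int)
    - ((PySem.Str.count s "O" : Nat) : Int)

-- ===== PRECONDITION & SPEC =====
def Spec_marsExploration (s : String) (out : Int) : Prop := out = marsExploration_alt s
instance (s : String) (out : Int) : Decidable (Spec_marsExploration s out) := by unfold Spec_marsExploration; infer_instance

-- ===== CLAIM (what is proved, stated in full; the proofs are below) =====
def Claim_equal_marsExploration : Prop := ∀ (s : String), Dom_marsExploration s → Spec_marsExploration s (marsExploration s)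

-- ===== LEMMAS AND PROOFS =====

-- a fold whose body ignores the element is an iterate
theorem pv_foldl_const_iterate {α β : Type} (f : α → α) (l : List β) (init : α) :
    l.foldl (fun d _ => f d) init = f^[l.length] init := by
  induction l generalizing init with
  | nil => rfl
  | cons h t ih => simp [List.foldl_cons, ih, Function.iterate_succ_apply]

-- filtering away x is unchanged by erasing one x
theorem pv_filter_erase {α : Type} [BEq α] [LawfulBEq α] (x : α) (d : List α) :
    (d.erase x).filter (fun a => !(a == x)) = d.filter (fun a => !(a == x)) := by
  induction d with
  | nil => rfl
  | cons h t ih =>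
    by_cases hx : h = x
    · subst hx; simp
    · have hb : (h == x) = false := by simp [hx]
      simp [hb, ih]

-- removing x count-many times is filtering x out
theorem pv_iterate_remove {α : Type} [BEq α] [LawfulBEq α] (x : α) :
    ∀ (n : Nat) (d : List α), d.count x = n →
    (fun d => (PySem.List.remove? d x).getD d)^[n] d = d.filter (fun a => !(a == x)) := by
  intro n
  induction n with
  | zero =>
    intro d hc
    simp only [Function.iterate_zero, id_eq]
    symm
    apply List.filter_eq_self.mpr
    intro a ha
    have : a ≠ x := by
      intro h
      subst h
      rw [List.count_eq_zero] at hc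
      exact hc ha
    simp [this]
  | succ n ih =>
    intro d hc
    have hmem : x ∈ d := by
      have : 0 < d.count x := by omega
      exact List.count_pos_iff.mp this
    rw [Function.iterate_succ_apply]
    have hrem : PySem.List.remove? d x = some (d.erase x) :=
      PySem.List.remove?_eq_some_erase d x hmem
    rw [hrem]
    simp only [Option.getD_some]
    have hcount : (d.erase x).count x = n := by
      rw [List.count_erase_self]; omega
    rw [ih _ hcount, pv_filter_erase]

-- a Python 'for _ in range(d.count(x)): d.remove(x)' loop is a filter
theorem pv_remove_loop {α : Type} [BEq α] [LawfulBEq α] (x : α) (d : List α) :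
    (PySem.List.pyRange 0 ((d.count x : Nat) : Int) 1).foldl
      (fun d _ => (PySem.List.remove? d x).getD d) d = d.filter (fun a => !(a == x)) := by
  rw [pv_foldl_const_iterate]
  have hlen : (PySem.List.pyRange 0 ((d.count x : Nat) : Int) 1).length = d.count x := by
    rw [PySem.List.pyRange_zero_natCast]; simp
  rw [hlen]
  exact pv_iterate_remove x _ d rfl

-- Chars.count with a one-character needle is List.count
theorem pv_go_single (c : Char) : ∀ (fuel : Nat) (t : List Char) (acc : Nat), t.length ≤ fuel →
    PySem.Chars.count.go [c] fuel t acc = acc + t.count c := by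
  intro fuel
  induction fuel with
  | zero =>
    intro t acc h
    have : t = [] := by cases t <;> simp_all
    subst this; rfl
  | succ n ih =>
    intro t acc h
    cases t with
    | nil => rfl
    | cons hd tl =>
      simp only [PySem.Chars.count.go]
      have hlen : tl.length ≤ n := by simp at h; omega
      by_cases hc : hd = c
      · subst hc
        simp [List.isPrefixOf, ih _ _ hlen]
        omega
      · have : (c == hd) = false := by simp [Ne.symm hc]
        simp [List.isPrefixOf, this, ih _ _ hlen, hc]

theorem pv_count_single (c : Char) (cs : List Char) :
    PySem.Chars.count cs [c] = cs.count c := by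
  simp [PySem.Chars.count, pv_go_single c cs.length cs 0 le_rfl]

-- the 3-chunks of cs reassemble to cs
theorem pv_chunks_nat : ∀ (m : Nat) (cs : List Char), cs.length ≤ 3*m →
    ((List.range m).map (fun j => ((cs.drop (3*j)).take 3))).flatten = cs := by
  intro m
  induction m with
  | zero =>
    intro cs h
    have : cs = [] := by cases cs <;> simp_all
    subst this; rfl
  | succ n ih =>
    intro cs h
    rw [List.range_succ_eq_map, List.map_cons, List.map_map, List.flatten_cons]
    have : ((List.range n).map ((fun j => (cs.drop (3*j)).take 3) ∘ Nat.succ))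
        = (List.range n).map (fun j => ((cs.drop 3).drop (3*j)).take 3) := by
      apply List.map_congr_left
      intro j _
      simp [Function.comp, List.drop_drop]
      ring_nf
    rw [this, ih (cs.drop 3) (by simp; omega)]
    simp

-- A's chunk list is the 3-chunk list
theorem pv_L (cs : List Char) :
    (PySem.List.pyRange 0 ((cs.length : Nat) : Int) 3).map
      (fun i => PySem.List.slice cs (some i) (some (i + 3)))
      = (List.range (((cs.length : Int) + 2) / 3).toNat).map (fun j => ((cs.drop (3*j)).take 3)) := by
  rw [PySem.List.pyRange_of_pos 0 _ (by norm_num), List.map_map]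
  by_cases h0 : (0:Int) < (cs.length : Int)
  · rw [if_pos h0]
    have : ((cs.length:Int) - 0 + 3 - 1) / 3 = ((cs.length:Int) + 2) / 3 := by ring_nf
    rw [this]
    apply List.map_congr_left
    intro j _
    have h3 : (0 + 3 * (j:Int)) = ((3*j : Nat) : Int) := by push_cast; ring
    simp only [Function.comp, h3]
    have h4 : (((3*j : Nat) : Int) + 3) = ((3*j : Nat) : Int) + ((3:Nat) : Int) := by norm_num
    rw [h4, PySem.List.slice_natCast_add]
  · rw [if_neg h0]
    have : cs.length = 0 := by omega
    rw [this]
    norm_num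

-- dropping the "SOS" chunks does not change the count of non-'S'/'O' characters
theorem pv_skip (L : List (List Char)) :
    ((L.filter (fun a => !(a == "SOS".toList))).flatten).countP
        (fun a => !(a == 'O') && !(a == 'S'))
      = (L.flatten).countP (fun a => !(a == 'O') && !(a == 'S')) := by
  induction L with
  | nil => rfl
  | cons h t ih =>
    by_cases hs : h = "SOS".toList
    · rw [List.filter_cons_of_neg (by simp [hs]), List.flatten_cons, List.countP_append, ih, hs]
      have : (("SOS".toList).countP (fun a => !(a == 'O') && !(a == 'S'))) = 0 := by decide
      rw [this, Nat.zero_add]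
    · rw [List.filter_cons_of_pos (by simpa using hs), List.flatten_cons, List.flatten_cons,
        List.countP_append, List.countP_append, ih]

-- each character is 'S', 'O', or counted
theorem pv_partition (cs : List Char) :
    cs.countP (fun a => !(a == 'O') && !(a == 'S')) + cs.count 'S' + cs.count 'O'
      = cs.length := by
  induction cs with
  | nil => rfl
  | cons h t ih =>
    by_cases hS : h = 'S' <;> by_cases hO : h = 'O' <;>
      simp_all <;> omega

-- ===== VERDICT (by name: the statement is the Claim_ definition above) =====
theorem marsExploration_spec : Claim_equal_marsExploration := by
  intro s _
  simp only [Spec_marsExploration, marsExploration, marsExploration_alt,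
    PySem.List.count_eq, List.map_id']
  rw [pv_remove_loop, PySem.List.foldl_append_eq_flatten, List.nil_append,
    pv_remove_loop, pv_remove_loop]
  rw [List.filter_filter, ← List.countP_eq_length_filter, pv_skip, pv_L]
  have hm : (((s.toList.length : Int) + 2) / 3).toNat = (s.toList.length + 2) / 3 := by
    rw [show ((s.toList.length : Int) + 2) = (((s.toList.length + 2 : Nat)) : Int) by push_cast; ring]
    rw [show (3:Int) = ((3:Nat):Int) from rfl, ← Int.natCast_ediv]
    exact Int.toNat_natCast _
  rw [hm, pv_chunks_nat _ _ (by omega)]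
  have hp := pv_partition s.toList
  have hS : PySem.Str.count s "S" = s.toList.count 'S' := by
    rw [PySem.Str.count_eq]; exact pv_count_single 'S' s.toList
  have hO : PySem.Str.count s "O" = s.toList.count 'O' := by
    rw [PySem.Str.count_eq]; exact pv_count_single 'O' s.toList
  rw [hS, hO, PySem.Str.len_eq]
  omega
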